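-- pv_equiv track=rewrite | github.com/Cventura12/my-project | main_backup.py | calculate_authority_score
-- ===== SOURCE A (Python) =====
-- def calculate_authority_score(authority_str):
--     if not authority_str:
--         return 3
--
--     authority_lower = authority_str.lower()
--
--     if any(word in authority_lower for word in ['professor', 'prof', 'dr.', 'dean']):
--         return 10
--     elif any(word in authority_lower for word in ['manager', 'supervisor', 'boss', 'ceo', 'director']):
--         return 10
--     elif any(word in authority_lower for word in ['admin', 'administration', 'registrar', 'financial aid']):
--         return 9
--     elif any(word in authority_lower for word in ['client', 'customer']):
--         return 8
--     elif any(word in authority_lower for word in ['team', 'colleague', 'coworker']):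
--         return 5
--     else:
--         return 3
-- ===== SOURCE B (Python) =====
-- _TABLE = [
--     ('professor', 10), ('prof', 10), ('dr.', 10), ('dean', 10),
--     ('manager', 10), ('supervisor', 10), ('boss', 10), ('ceo', 10), ('director', 10),
--     ('admin', 9), ('administration', 9), ('registrar', 9), ('financial aid', 9),
--     ('client', 8), ('customer', 8),
--     ('team', 5), ('colleague', 5), ('coworker', 5),
-- ]
--
-- def calculate_authority_score(authority_str):
--     if not authority_str:
--         return 3
--     low = authority_str.lower()
--     best = 3
--     for kw, score in _TABLE:
--         if kw in low and score > best:
--             best = score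
--     return best
-- ===== Notes on version B (the rewrite author's own statement) =====
-- stated objective: simpler
-- what changed: Replaces the ordered elif chain over hard-coded keyword groups with a keyword->score table and a single max-accumulating pass over it (defaulting to 3), exploiting that branch priority equals descending score.
import Mathlib
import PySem

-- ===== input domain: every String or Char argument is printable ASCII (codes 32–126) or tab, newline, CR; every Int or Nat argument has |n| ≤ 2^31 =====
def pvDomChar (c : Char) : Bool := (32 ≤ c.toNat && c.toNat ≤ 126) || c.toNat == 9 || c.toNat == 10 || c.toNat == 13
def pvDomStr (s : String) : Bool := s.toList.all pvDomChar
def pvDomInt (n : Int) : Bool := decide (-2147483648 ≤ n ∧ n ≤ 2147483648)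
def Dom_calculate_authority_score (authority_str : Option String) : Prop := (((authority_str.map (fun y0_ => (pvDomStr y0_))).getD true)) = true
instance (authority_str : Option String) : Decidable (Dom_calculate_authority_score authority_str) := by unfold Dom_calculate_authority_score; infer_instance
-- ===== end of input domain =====

-- B replaces A's ordered elif chain over hard-coded keyword groups by a single
-- keyword→score table and one fold taking the maximum matching score (objective: simpler).

-- ===== PORT A =====
def calculate_authority_score (authority_str : Option String) : Int :=
  match authority_str with
  | none => 3
  | some s =>
    if s == "" then 3
    else
      let authority_lower := PySem.Str.lower s
      if ["professor", "prof", "dr.", "dean"].any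
          (fun word => PySem.Str.isIn word authority_lower) then 10
      else if ["manager", "supervisor", "boss", "ceo", "director"].any
          (fun word => PySem.Str.isIn word authority_lower) then 10
      else if ["admin", "administration", "registrar", "financial aid"].any
          (fun word => PySem.Str.isIn word authority_lower) then 9
      else if ["client", "customer"].any
          (fun word => PySem.Str.isIn word authority_lower) then 8
      else if ["team", "colleague", "coworker"].any
          (fun word => PySem.Str.isIn word authority_lower) then 5
      else 3

-- ===== PORT B =====
def pvTable : List (String × Int) :=
  [("professor", 10), ("prof", 10), ("dr.", 10), ("dean", 10),
   ("manager", 10), ("supervisor", 10), ("boss", 10), ("ceo", 10), ("director", 10),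
   ("admin", 9), ("administration", 9), ("registrar", 9), ("financial aid", 9),
   ("client", 8), ("customer", 8),
   ("team", 5), ("colleague", 5), ("coworker", 5)]

def calculate_authority_score_alt (authority_str : Option String) : Int :=
  match authority_str with
  | none => 3
  | some s =>
    if s == "" then 3
    else
      let low := PySem.Str.lower s
      pvTable.foldl
        (fun best p => if PySem.Str.isIn p.1 low && decide (p.2 > best) then p.2 else best) 3

-- ===== PRECONDITION & SPEC =====
def Spec_calculate_authority_score (authority_str : Option String) (out : Int) : Prop := out = calculate_authority_score_alt authority_str
instance (authority_str : Option String) (out : Int) : Decidable (Spec_calculate_authority_score authority_str out) := by unfold Spec_calculate_authority_score; infer_instance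

-- ===== CLAIM (what is proved, stated in full; the proofs are below) =====
def Claim_equal_calculate_authority_score : Prop := ∀ (authority_str : Option String), Dom_calculate_authority_score authority_str → Spec_calculate_authority_score authority_str (calculate_authority_score authority_str)

-- ===== LEMMAS AND PROOFS =====

-- Folding B's update over a constant-score segment of the table raises `best` to `s`
-- exactly when some keyword of the segment matches (per `f`) and `s > best`.
theorem pv_fold_gen (f : String → Bool) (s : Int) (kws : List String) (best : Int) :
    (kws.map (fun kw => (kw, s))).foldl
      (fun best p => if f p.1 && decide (p.2 > best) then p.2 else best) best
    = if kws.any f && decide (s > best) then s else best := by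
  induction kws generalizing best with
  | nil => simp
  | cons kw rest ih =>
    simp only [List.map_cons, List.foldl_cons, List.any_cons]
    rw [ih]
    by_cases h : f kw = true <;> by_cases hs : s > best <;>
      simp [h, hs] <;> omega

-- First-order specialization of pv_fold_gen to the actual substring test (rewritable by simp).
theorem pv_fold_const (low : String) (s : Int) (kws : List String) (best : Int) :
    (kws.map (fun kw => (kw, s))).foldl
      (fun best p => if PySem.Str.isIn p.1 low && decide (p.2 > best) then p.2 else best) best
    = if kws.any (fun kw => PySem.Str.isIn kw low) && decide (s > best) then s else best :=
  pv_fold_gen (fun kw => PySem.Str.isIn kw low) s kws best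

theorem pvTable_eq : pvTable =
    ((["professor", "prof", "dr.", "dean"] ++
      ["manager", "supervisor", "boss", "ceo", "director"]).map (fun kw => (kw, (10 : Int)))) ++
    (["admin", "administration", "registrar", "financial aid"].map (fun kw => (kw, (9 : Int)))) ++
    (["client", "customer"].map (fun kw => (kw, (8 : Int)))) ++
    (["team", "colleague", "coworker"].map (fun kw => (kw, (5 : Int)))) := rfl

-- ===== VERDICT (by name: the statement is the Claim_ definition above) =====
theorem calculate_authority_score_spec : Claim_equal_calculate_authority_score := by
  intro authority_str _
  unfold Spec_calculate_authority_score calculate_authority_score calculate_authority_score_alt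
  match authority_str with
  | none => rfl
  | some s =>
    by_cases hs : s == ""
    · simp [hs]
    · simp only [hs, Bool.false_eq_true, if_false]
      rw [pvTable_eq]
      simp only [List.foldl_append, pv_fold_const, List.any_append]
      generalize (["professor", "prof", "dr.", "dean"].any
          (fun word => PySem.Str.isIn word (PySem.Str.lower s))) = b1
      generalize (["manager", "supervisor", "boss", "ceo", "director"].any
          (fun word => PySem.Str.isIn word (PySem.Str.lower s))) = b2
      generalize (["admin", "administration", "registrar", "financial aid"].any
          (fun word => PySem.Str.isIn word (PySem.Str.lower s))) = b3
      generalize (["client", "customer"].any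
          (fun word => PySem.Str.isIn word (PySem.Str.lower s))) = b4
      generalize (["team", "colleague", "coworker"].any
          (fun word => PySem.Str.isIn word (PySem.Str.lower s))) = b5
      cases b1 <;> cases b2 <;> cases b3 <;> cases b4 <;> cases b5 <;> decide
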